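-- pv_equiv track=rewrite | github.com/idiap/atco2-corpus | lm/resources/callsign_expansion/expand_callsign.py | rewrite_special
-- ===== SOURCE A (Python) =====
-- def rewrite_special(words):
--     """Rewrite alredy expanded input to cover special cases"""
--
--     ans = []
--
--     # 'triple'
--     prev_word = None
--     counter = 1
--     for i, word in enumerate(words):
--         if word == prev_word:
--             counter += 1
--         else:
--             counter = 1
--
--         if counter == 3:
--             ans.append(words[: (i - 2)] + ["triple"] + [word] + words[(i + 1) :])
--             if word == "zero":
--                 ans.append(words[: (i - 2)] + ["triple"] + ["o"] + words[(i + 1) :])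
--             # shortened,
--             ans.append(["triple"] + [word] + words[(i + 1) :])
--
--         prev_word = word
--
--     # 'double'
--     prev_word = None
--     counter = 1
--     for i, word in enumerate(words):
--         if word == prev_word:
--             counter += 1
--         else:
--             counter = 1
--
--         next_word = None
--         try:
--             next_word = words[i + 1]
--         except:
--             pass
--
--         if counter == 2 and next_word != word:
--             ans.append(words[: (i - 1)] + ["double"] + [word] + words[(i + 1) :])
--             if word == "zero":
--                 ans.append(words[: (i - 1)] + ["double"] + ["o"] + words[(i + 1) :])
--             # shortened,
--             ans.append(["double"] + [word] + words[(i + 1) :])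
--
--         prev_word = word
--
--     return ans
-- ===== SOURCE B (Python) =====
-- def _runs(words, start=0):
--     """Maximal runs of consecutive equal words as (start_index, word, length)."""
--     if not words:
--         return []
--     w = words[0]
--     run = 1
--     for x in words[1:]:
--         if x != w:
--             break
--         run += 1
--     return [(start, w, run)] + _runs(words[run:], start + run)
--
--
-- def rewrite_special(words):
--     """Rewrite alredy expanded input to cover special cases"""
--     runs = _runs(words)
--     ans = []
--     for start, w, length in runs:
--         if length >= 3:
--             head, tail = words[:start], words[start + 3:]
--             ans.append(head + ["triple", w] + tail)
--             if w == "zero":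
--                 ans.append(head + ["triple", "o"] + tail)
--             ans.append(["triple", w] + tail)
--     for start, w, length in runs:
--         if length == 2:
--             head, tail = words[:start], words[start + 2:]
--             ans.append(head + ["double", w] + tail)
--             if w == "zero":
--                 ans.append(head + ["double", "o"] + tail)
--             ans.append(["double", w] + tail)
--     return ans
-- ===== Notes on version B (the rewrite author's own statement) =====
-- stated objective: alternative
-- what changed: Replaces the two prev/counter state-machine scans by first computing the maximal runs of consecutive equal words once, then emitting triple-variants for runs of length >= 3 and double-variants for runs of length exactly 2 directly from each run's start index.
import Mathlib
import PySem

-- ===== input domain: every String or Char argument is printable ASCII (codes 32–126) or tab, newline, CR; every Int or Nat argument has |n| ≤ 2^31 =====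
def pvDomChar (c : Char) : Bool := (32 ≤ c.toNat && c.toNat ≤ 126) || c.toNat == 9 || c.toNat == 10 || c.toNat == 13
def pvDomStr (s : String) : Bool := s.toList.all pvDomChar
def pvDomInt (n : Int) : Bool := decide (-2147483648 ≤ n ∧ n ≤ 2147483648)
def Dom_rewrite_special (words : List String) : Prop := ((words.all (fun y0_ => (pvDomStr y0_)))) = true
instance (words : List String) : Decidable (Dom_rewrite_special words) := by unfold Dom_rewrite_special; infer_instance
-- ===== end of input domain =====

-- B replaces A's two prev_word/counter state-machine scans by one run-grouping pass followed by
-- a triple pass and a double pass over the runs (objective: alternative decomposition; same cost).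

-- ===== PORT A =====
-- A-side helpers: the two loop bodies of A, named so the folds can be reasoned about
def stepT (words : List String) (st : List (List String) × Option String × Int) (p : Int × String) :
    List (List String) × Option String × Int :=
  let cnt := if some p.2 = st.2.1 then st.2.2 + 1 else 1
  let ans := if cnt = 3 then
      let a1 := st.1 ++ [PySem.List.slice words none (some (p.1 - 2)) ++ ["triple"] ++ [p.2] ++ PySem.List.slice words (some (p.1 + 1)) none]
      let a2 := if p.2 = "zero" then a1 ++ [PySem.List.slice words none (some (p.1 - 2)) ++ ["triple"] ++ ["o"] ++ PySem.List.slice words (some (p.1 + 1)) none] else a1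
      a2 ++ [["triple"] ++ [p.2] ++ PySem.List.slice words (some (p.1 + 1)) none]
    else st.1
  (ans, some p.2, cnt)

def stepD (words : List String) (st : List (List String) × Option String × Int) (p : Int × String) :
    List (List String) × Option String × Int :=
  let cnt := if some p.2 = st.2.1 then st.2.2 + 1 else 1
  let next := PySem.List.pyGet? words (p.1 + 1)   -- try: words[i+1]; except: None
  let ans := if cnt = 2 ∧ next ≠ some p.2 then
      let a1 := st.1 ++ [PySem.List.slice words none (some (p.1 - 1)) ++ ["double"] ++ [p.2] ++ PySem.List.slice words (some (p.1 + 1)) none]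
      let a2 := if p.2 = "zero" then a1 ++ [PySem.List.slice words none (some (p.1 - 1)) ++ ["double"] ++ ["o"] ++ PySem.List.slice words (some (p.1 + 1)) none] else a1
      a2 ++ [["double"] ++ [p.2] ++ PySem.List.slice words (some (p.1 + 1)) none]
    else st.1
  (ans, some p.2, cnt)

-- literal transliteration of A: two enumerate-folds carrying (ans, prev_word, counter)
def rewrite_special (words : List String) : List (List String) :=
  let trip := (PySem.List.enumerate words 0).foldl (stepT words) ([], none, 1)
  let dbl := (PySem.List.enumerate words 0).foldl (stepD words) (trip.1, none, 1)
  dbl.1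

-- ===== PORT B =====
-- the for-with-break loop of _runs counting the leading copies of w in words[1:]
def countLead (w : String) : List String → Nat
  | [] => 0
  | x :: r => if x ≠ w then 0 else countLead w r + 1

-- _runs: maximal runs of consecutive equal words as (start, word, length)
def runsB : List String → Nat → List (Nat × String × Nat)
  | [], _ => []
  | w :: r, start =>
      (start, w, 1 + countLead w r) :: runsB (List.drop (countLead w r) r) (start + (1 + countLead w r))
termination_by ws _ => ws.length
decreasing_by
  simp only [List.length_drop, List.length_cons]; omega

-- B-side helpers: the two loop bodies of B (slices words[:s] / words[s+k:] with
-- nonnegative in-range indices are exactly take/drop)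
def stepBT (words : List String) (ans : List (List String)) (r : Nat × String × Nat) : List (List String) :=
  if 3 ≤ r.2.2 then
    let head := words.take r.1
    let tail := words.drop (r.1 + 3)
    let a1 := ans ++ [head ++ ["triple", r.2.1] ++ tail]
    let a2 := if r.2.1 = "zero" then a1 ++ [head ++ ["triple", "o"] ++ tail] else a1
    a2 ++ [["triple", r.2.1] ++ tail]
  else ans

def stepBD (words : List String) (ans : List (List String)) (r : Nat × String × Nat) : List (List String) :=
  if r.2.2 = 2 then
    let head := words.take r.1
    let tail := words.drop (r.1 + 2)
    let a1 := ans ++ [head ++ ["double", r.2.1] ++ tail]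
    let a2 := if r.2.1 = "zero" then a1 ++ [head ++ ["double", "o"] ++ tail] else a1
    a2 ++ [["double", r.2.1] ++ tail]
  else ans

def rewrite_special_alt (words : List String) : List (List String) :=
  let runs := runsB words 0
  let ans := runs.foldl (stepBT words) []
  let ans2 := runs.foldl (stepBD words) ans
  ans2

-- ===== PRECONDITION & SPEC =====
def Spec_rewrite_special (words : List String) (out : List (List String)) : Prop := out = rewrite_special_alt words
instance (words : List String) (out : List (List String)) : Decidable (Spec_rewrite_special words out) := by unfold Spec_rewrite_special; infer_instance

-- ===== CLAIM (what is proved, stated in full; the proofs are below) =====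
def Claim_equal_rewrite_special : Prop := ∀ (words : List String), Dom_rewrite_special words → Spec_rewrite_special words (rewrite_special words)

-- ===== LEMMAS AND PROOFS =====

-- A's per-trigger emissions, at trigger index i
def emitTA (words : List String) (i : Int) (w : String) : List (List String) :=
  [PySem.List.slice words none (some (i - 2)) ++ ["triple"] ++ [w] ++ PySem.List.slice words (some (i + 1)) none]
  ++ (if w = "zero" then [PySem.List.slice words none (some (i - 2)) ++ ["triple"] ++ ["o"] ++ PySem.List.slice words (some (i + 1)) none] else [])
  ++ [["triple"] ++ [w] ++ PySem.List.slice words (some (i + 1)) none]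

def emitDA (words : List String) (i : Int) (w : String) : List (List String) :=
  [PySem.List.slice words none (some (i - 1)) ++ ["double"] ++ [w] ++ PySem.List.slice words (some (i + 1)) none]
  ++ (if w = "zero" then [PySem.List.slice words none (some (i - 1)) ++ ["double"] ++ ["o"] ++ PySem.List.slice words (some (i + 1)) none] else [])
  ++ [["double"] ++ [w] ++ PySem.List.slice words (some (i + 1)) none]

-- B's per-run emissions, for a run starting at s
def emitT (words : List String) (s : Nat) (w : String) : List (List String) :=
  [words.take s ++ ["triple", w] ++ words.drop (s + 3)]
  ++ (if w = "zero" then [words.take s ++ ["triple", "o"] ++ words.drop (s + 3)] else [])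
  ++ [["triple", w] ++ words.drop (s + 3)]

def emitD (words : List String) (s : Nat) (w : String) : List (List String) :=
  [words.take s ++ ["double", w] ++ words.drop (s + 2)]
  ++ (if w = "zero" then [words.take s ++ ["double", "o"] ++ words.drop (s + 2)] else [])
  ++ [["double", w] ++ words.drop (s + 2)]

def outT (words : List String) (rs : List (Nat × String × Nat)) : List (List String) :=
  rs.flatMap (fun r => if 3 ≤ r.2.2 then emitT words r.1 r.2.1 else [])

def outD (words : List String) (rs : List (Nat × String × Nat)) : List (List String) :=
  rs.flatMap (fun r => if r.2.2 = 2 then emitD words r.1 r.2.1 else [])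

-- recursive forms of A's two folds, with Nat positions
def trT (words : List String) : List String → Nat → (List (List String) × Option String × Int) → (List (List String) × Option String × Int)
  | [], _, st => st
  | w :: r, k, st =>
      let cnt := if some w = st.2.1 then st.2.2 + 1 else 1
      trT words r (k + 1) ((if cnt = 3 then st.1 ++ emitTA words (k : Int) w else st.1), some w, cnt)

def trD (words : List String) : List String → Nat → (List (List String) × Option String × Int) → (List (List String) × Option String × Int)
  | [], _, st => st
  | w :: r, k, st =>
      let cnt := if some w = st.2.1 then st.2.2 + 1 else 1
      let next := PySem.List.pyGet? words ((k : Int) + 1)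
      trD words r (k + 1) ((if cnt = 2 ∧ next ≠ some w then st.1 ++ emitDA words (k : Int) w else st.1), some w, cnt)

lemma stepT_eq (words : List String) (st : List (List String) × Option String × Int) (k : Nat) (w : String) :
    stepT words st ((k : Int), w) =
      (let cnt := if some w = st.2.1 then st.2.2 + 1 else 1
       ((if cnt = 3 then st.1 ++ emitTA words (k : Int) w else st.1), some w, cnt)) := by
  simp only [stepT, emitTA]
  split_ifs <;> simp

lemma stepD_eq (words : List String) (st : List (List String) × Option String × Int) (k : Nat) (w : String) :
    stepD words st ((k : Int), w) =
      (let cnt := if some w = st.2.1 then st.2.2 + 1 else 1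
       let next := PySem.List.pyGet? words ((k : Int) + 1)
       ((if cnt = 2 ∧ next ≠ some w then st.1 ++ emitDA words (k : Int) w else st.1), some w, cnt)) := by
  simp only [stepD, emitDA]
  split_ifs <;> simp

lemma bridgeT (words : List String) : ∀ (ws : List String) (k : Nat) (st : List (List String) × Option String × Int),
    (PySem.List.enumerate ws ((k : Nat) : Int)).foldl (stepT words) st = trT words ws k st := by
  intro ws
  induction ws with
  | nil => intro k st; simp [PySem.List.enumerate, trT]
  | cons w r ih =>
    intro k st
    rw [PySem.List.enumerate_cons, List.foldl_cons, stepT_eq]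
    have hc : ((k : Nat) : Int) + 1 = (((k + 1 : Nat)) : Int) := by push_cast; ring
    rw [hc, ih]
    simp only [trT]

lemma bridgeD (words : List String) : ∀ (ws : List String) (k : Nat) (st : List (List String) × Option String × Int),
    (PySem.List.enumerate ws ((k : Nat) : Int)).foldl (stepD words) st = trD words ws k st := by
  intro ws
  induction ws with
  | nil => intro k st; simp [PySem.List.enumerate, trD]
  | cons w r ih =>
    intro k st
    rw [PySem.List.enumerate_cons, List.foldl_cons, stepD_eq]
    have hc : ((k : Nat) : Int) + 1 = (((k + 1 : Nat)) : Int) := by push_cast; ring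
    rw [hc, ih]
    simp only [trD]
    rw [hc]

lemma stepBT_eq (words : List String) (ans : List (List String)) (r : Nat × String × Nat) :
    stepBT words ans r = ans ++ (if 3 ≤ r.2.2 then emitT words r.1 r.2.1 else []) := by
  rcases r with ⟨s, w, len⟩
  simp only [stepBT, emitT]
  split_ifs <;> simp

lemma stepBD_eq (words : List String) (ans : List (List String)) (r : Nat × String × Nat) :
    stepBD words ans r = ans ++ (if r.2.2 = 2 then emitD words r.1 r.2.1 else []) := by
  rcases r with ⟨s, w, len⟩
  simp only [stepBD, emitD]
  split_ifs <;> simp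

lemma foldBT (words : List String) : ∀ (rs : List (Nat × String × Nat)) (ans : List (List String)),
    rs.foldl (stepBT words) ans = ans ++ outT words rs := by
  intro rs
  induction rs with
  | nil => intro ans; simp [outT]
  | cons r rs ih => intro ans; rw [List.foldl_cons, stepBT_eq, ih]; simp [outT]

lemma foldBD (words : List String) : ∀ (rs : List (Nat × String × Nat)) (ans : List (List String)),
    rs.foldl (stepBD words) ans = ans ++ outD words rs := by
  intro rs
  induction rs with
  | nil => intro ans; simp [outD]
  | cons r rs ih => intro ans; rw [List.foldl_cons, stepBD_eq, ih]; simp [outD]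

lemma take_countLead (w : String) : ∀ (r : List String),
    List.take (countLead w r) r = List.replicate (countLead w r) w := by
  intro r
  induction r with
  | nil => simp [countLead]
  | cons x r ih =>
    by_cases h : x = w
    · subst h
      simp [countLead, List.replicate_succ, ih]
    · simp [countLead, h]

lemma drop_countLead_ne (w : String) : ∀ (r : List String) (x : String) (r' : List String),
    List.drop (countLead w r) r = x :: r' → x ≠ w := by
  intro r
  induction r with
  | nil => intro x r' h; simp [countLead] at h
  | cons y r ih =>
    intro x r' h
    by_cases hy : y = w
    · subst hy
      simp [countLead] at h
      exact ih x r' h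
    · simp [countLead, hy] at h
      rw [← h.1]; exact hy

lemma trT_append (words : List String) : ∀ (xs ys : List String) (k : Nat) (st : List (List String) × Option String × Int),
    trT words (xs ++ ys) k st = trT words ys (k + xs.length) (trT words xs k st) := by
  intro xs
  induction xs with
  | nil => intro ys k st; simp [trT]
  | cons x xs ih =>
    intro ys k st
    simp only [List.cons_append, trT]
    rw [ih]
    have h : k + 1 + xs.length = k + (x :: xs).length := by simp; omega
    rw [h]

lemma trD_append (words : List String) : ∀ (xs ys : List String) (k : Nat) (st : List (List String) × Option String × Int),
    trD words (xs ++ ys) k st = trD words ys (k + xs.length) (trD words xs k st) := by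
  intro xs
  induction xs with
  | nil => intro ys k st; simp [trD]
  | cons x xs ih =>
    intro ys k st
    simp only [List.cons_append, trD]
    rw [ih]
    have h : k + 1 + xs.length = k + (x :: xs).length := by simp; omega
    rw [h]

lemma trT_replicate (words : List String) (w : String) : ∀ (a k : Nat) (acc : List (List String)) (c : Int), 3 ≤ c →
    trT words (List.replicate a w) k (acc, some w, c) = (acc, some w, c + a) := by
  intro a
  induction a with
  | zero => intro k acc c hc; simp [trT]
  | succ a ih =>
    intro k acc c hc
    rw [List.replicate_succ]
    simp only [trT]
    norm_num
    rw [if_neg (by omega : ¬ (c + 1 = 3)), ih _ _ _ (by omega)]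
    simp only [Prod.mk.injEq]
    exact ⟨trivial, trivial, by ring⟩

lemma trD_replicate (words : List String) (w : String) : ∀ (a k : Nat) (acc : List (List String)) (c : Int), 2 ≤ c →
    trD words (List.replicate a w) k (acc, some w, c) = (acc, some w, c + a) := by
  intro a
  induction a with
  | zero => intro k acc c hc; simp [trD]
  | succ a ih =>
    intro k acc c hc
    rw [List.replicate_succ]
    simp only [trD]
    norm_num
    have hcond : ¬ ((c + 1 = 2) ∧ PySem.List.pyGet? words ((k : Int) + 1) ≠ some w) := by
      rintro ⟨h1, -⟩; omega
    rw [if_neg hcond, ih _ _ _ (by omega)]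
    simp only [Prod.mk.injEq]
    exact ⟨trivial, trivial, by ring⟩

lemma emitTA_eq (words : List String) (k : Nat) (w : String) :
    emitTA words (((k + 2 : Nat)) : Int) w = emitT words k w := by
  simp only [emitTA, emitT]
  rw [show ((k + 2 : Nat) : Int) - 2 = ((k : Nat) : Int) from by push_cast; ring,
      show ((k + 2 : Nat) : Int) + 1 = ((k + 3 : Nat) : Int) from by push_cast; ring,
      PySem.List.slice_to_natCast, PySem.List.slice_from_natCast]
  simp

lemma emitDA_eq (words : List String) (k : Nat) (w : String) :
    emitDA words (((k + 1 : Nat)) : Int) w = emitD words k w := by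
  simp only [emitDA, emitD]
  rw [show ((k + 1 : Nat) : Int) - 1 = ((k : Nat) : Int) from by push_cast; ring,
      show ((k + 1 : Nat) : Int) + 1 = ((k + 2 : Nat) : Int) from by push_cast; ring,
      PySem.List.slice_to_natCast, PySem.List.slice_from_natCast]
  simp

lemma runsB_cons (w : String) (r : List String) (k : Nat) :
    runsB (w :: r) k = (k, w, 1 + countLead w r) :: runsB (List.drop (countLead w r) r) (k + (1 + countLead w r)) := by
  simp [runsB]

lemma outT_cons (words : List String) (s : Nat) (w : String) (len : Nat) (rs : List (Nat × String × Nat)) :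
    outT words ((s, w, len) :: rs) = (if 3 ≤ len then emitT words s w else []) ++ outT words rs := by
  simp [outT]

lemma outD_cons (words : List String) (s : Nat) (w : String) (len : Nat) (rs : List (Nat × String × Nat)) :
    outD words ((s, w, len) :: rs) = (if len = 2 then emitD words s w else []) ++ outD words rs := by
  simp [outD]

-- two consecutive equal words entered with counter 1: the second one triggers 'triple'
lemma trT_two (words : List String) (w : String) (tail : List String) (k : Nat) (acc : List (List String)) :
    trT words (w :: w :: tail) k (acc, some w, 1) =
      trT words tail (k + 1 + 1) (acc ++ emitTA words (((k + 1 : Nat)) : Int) w, some w, 3) := by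
  simp only [trT]
  norm_num

-- one equal word entered with counter 1: counter becomes 2, no triple yet
lemma trT_one_mid (words : List String) (w : String) (tail : List String) (k : Nat) (acc : List (List String)) :
    trT words (w :: tail) k (acc, some w, 1) = trT words tail (k + 1) (acc, some w, 2) := by
  simp only [trT]
  norm_num

-- one more equal word entered with counter 1, the word after it differs: triggers 'double'
lemma trD_one_hit (words : List String) (w : String) (tail : List String) (k : Nat) (acc : List (List String))
    (hnext : PySem.List.pyGet? words (((k : Nat) : Int) + 1) ≠ some w) :
    trD words (w :: tail) k (acc, some w, 1) =
      trD words tail (k + 1) (acc ++ emitDA words ((k : Nat) : Int) w, some w, 2) := by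
  simp only [trD]
  norm_num
  rw [if_neg hnext]

-- one more equal word entered with counter 1, followed by yet another copy: no trigger
lemma trD_one_mid (words : List String) (w : String) (tail : List String) (k : Nat) (acc : List (List String))
    (hnext : PySem.List.pyGet? words (((k : Nat) : Int) + 1) = some w) :
    trD words (w :: tail) k (acc, some w, 1) =
      trD words tail (k + 1) (acc, some w, 2) := by
  simp only [trD]
  norm_num
  rw [if_pos hnext]

lemma trT_main (words : List String) : ∀ (n : Nat) (ws : List String) (k : Nat) (prev : Option String) (c : Int) (acc : List (List String)),
    ws.length ≤ n → ws = List.drop k words → (∀ x r, ws = x :: r → prev ≠ some x) →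
    (trT words ws k (acc, prev, c)).1 = acc ++ outT words (runsB ws k) := by
  intro n
  induction n with
  | zero =>
    intro ws k prev c acc hlen hdrop hprev
    have hnil : ws = [] := List.eq_nil_of_length_eq_zero (Nat.le_zero.mp hlen)
    subst hnil; simp [trT, runsB, outT]
  | succ n ih =>
    intro ws k prev c acc hlen hdrop hprev
    cases ws with
    | nil => simp [trT, runsB, outT]
    | cons w r =>
      have hprev' : ¬ (some w = prev) := fun h => hprev w r rfl h.symm
      have hlenr : r.length ≤ n := by simp only [List.length_cons] at hlen; omega
      have hdropr : r = List.drop (k + 1) words := by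
        have h1 := congrArg List.tail hdrop
        simpa [List.tail_drop] using h1
      simp only [trT]
      rw [if_neg hprev', if_neg (by norm_num : ¬ ((1 : Int) = 3))]
      rw [runsB_cons]
      have htake := take_countLead w r
      have hne := drop_countLead_ne w r
      obtain ⟨a, hg⟩ : ∃ a, countLead w r = a := ⟨_, rfl⟩
      rw [hg] at htake hne ⊢
      have hsplit : r = List.replicate a w ++ List.drop a r := by
        conv_lhs => rw [← List.take_append_drop a r]
        rw [htake]
      have hdropa : List.drop a r = List.drop (k + 1 + a) words := by
        rw [hdropr, List.drop_drop]
      have hlend : (List.drop a r).length ≤ n := by simp only [List.length_drop]; omega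
      have hprevd : ∀ x r', List.drop a r = x :: r' → (some w : Option String) ≠ some x :=
        fun x r' h hx => hne x r' h (Option.some.inj hx).symm
      rw [outT_cons]
      rcases a with _ | _ | a
      · -- run of length 1
        rw [ih r (k + 1) (some w) 1 acc hlenr hdropr (fun x r' h => hprevd x r' (by simpa using h))]
        simp
      · -- run of length 2: still no triple
        have hr1 : r = w :: List.drop 1 r := by simpa using hsplit
        conv_lhs => rw [hr1]
        rw [trT_one_mid words w _ (k + 1) acc]
        rw [ih (List.drop 1 r) (k + 1 + 1) (some w) 2 acc hlend hdropa hprevd]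
        rw [if_neg (by omega : ¬ ((3:Nat) ≤ 1 + (0 + 1)))]
        rw [show k + (1 + (0 + 1)) = k + 1 + 1 from by omega]
        simp
      · -- run of length a+3: triple triggers at its third word
        have hr2 : r = w :: w :: (List.replicate a w ++ List.drop (a + 2) r) := by
          simpa [List.replicate_succ] using hsplit
        conv_lhs => rw [hr2]
        rw [trT_two words w _ (k + 1) acc]
        rw [trT_append]
        simp only [List.length_replicate]
        rw [trT_replicate words w a (k + 1 + 1 + 1) _ 3 le_rfl]
        have hdropa' : List.drop (a + 2) r = List.drop (k + 1 + 1 + 1 + a) words := by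
          rw [hdropa]; congr 1; omega
        rw [ih (List.drop (a + 2) r) (k + 1 + 1 + 1 + a) (some w) (3 + a) _ hlend hdropa' hprevd]
        rw [show ((k + 1) + 1 : Nat) = k + 2 from rfl, emitTA_eq]
        rw [if_pos (by omega : (3:Nat) ≤ 1 + (a + 2))]
        rw [show k + (1 + (a + 2)) = k + 1 + 1 + 1 + a from by omega]
        simp

lemma trD_main (words : List String) : ∀ (n : Nat) (ws : List String) (k : Nat) (prev : Option String) (c : Int) (acc : List (List String)),
    ws.length ≤ n → ws = List.drop k words → (∀ x r, ws = x :: r → prev ≠ some x) →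
    (trD words ws k (acc, prev, c)).1 = acc ++ outD words (runsB ws k) := by
  intro n
  induction n with
  | zero =>
    intro ws k prev c acc hlen hdrop hprev
    have hnil : ws = [] := List.eq_nil_of_length_eq_zero (Nat.le_zero.mp hlen)
    subst hnil; simp [trD, runsB, outD]
  | succ n ih =>
    intro ws k prev c acc hlen hdrop hprev
    cases ws with
    | nil => simp [trD, runsB, outD]
    | cons w r =>
      have hprev' : ¬ (some w = prev) := fun h => hprev w r rfl h.symm
      have hlenr : r.length ≤ n := by simp only [List.length_cons] at hlen; omega
      have hdropr : r = List.drop (k + 1) words := by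
        have h1 := congrArg List.tail hdrop
        simpa [List.tail_drop] using h1
      have hgw : ∀ j, r[j]? = words[k + 1 + j]? := by
        intro j; rw [hdropr, List.getElem?_drop]
      simp only [trD]
      rw [if_neg hprev']
      rw [if_neg (by rintro ⟨h1, -⟩; norm_num at h1 :
            ¬ (((1 : Int) = 2) ∧ PySem.List.pyGet? words ((k : Int) + 1) ≠ some w))]
      rw [runsB_cons]
      have htake := take_countLead w r
      have hne := drop_countLead_ne w r
      obtain ⟨a, hg⟩ : ∃ a, countLead w r = a := ⟨_, rfl⟩
      rw [hg] at htake hne ⊢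
      have hsplit : r = List.replicate a w ++ List.drop a r := by
        conv_lhs => rw [← List.take_append_drop a r]
        rw [htake]
      have hdropa : List.drop a r = List.drop (k + 1 + a) words := by
        rw [hdropr, List.drop_drop]
      have hlend : (List.drop a r).length ≤ n := by simp only [List.length_drop]; omega
      have hprevd : ∀ x r', List.drop a r = x :: r' → (some w : Option String) ≠ some x :=
        fun x r' h hx => hne x r' h (Option.some.inj hx).symm
      rw [outD_cons]
      rcases a with _ | _ | a
      · -- run of length 1: no double
        rw [ih r (k + 1) (some w) 1 acc hlenr hdropr (fun x r' h => hprevd x r' (by simpa using h))]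
        simp
      · -- run of length 2: double triggers at its second word
        have hr1 : r = w :: List.drop 1 r := by simpa using hsplit
        have hnext : PySem.List.pyGet? words (((k + 1 : Nat) : Int) + 1) ≠ some w := by
          rw [show (((k + 1 : Nat) : Int) + 1) = (((k + 2 : Nat)) : Int) from by push_cast; ring,
              PySem.List.pyGet?_natCast]
          have h2 : words[k + 2]? = (List.drop 1 r)[0]? := by
            have h3 := hgw 1
            conv_lhs at h3 => rw [hr1]
            simpa using h3.symm
          rw [h2]
          cases hdd : (List.drop 1 r) with
          | nil => simp
          | cons x t =>
            simp only [List.getElem?_cons_zero]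
            exact fun hh => hne x t hdd (Option.some.inj hh)
        conv_lhs => rw [hr1]
        rw [trD_one_hit words w _ (k + 1) acc hnext]
        rw [ih (List.drop 1 r) (k + 1 + 1) (some w) 2 _ hlend hdropa hprevd]
        rw [emitDA_eq]
        rw [if_pos (by norm_num : (1 + 1 : Nat) = 2)]
        rw [show k + (1 + 1) = k + 1 + 1 from by omega]
        simp
      · -- run of length a+3: no double
        have hr2 : r = w :: (List.replicate (a + 1) w ++ List.drop (a + 1 + 1) r) := by
          conv_lhs => rw [hsplit]
          rw [List.replicate_succ, List.cons_append]
        have hnext : PySem.List.pyGet? words (((k + 1 : Nat) : Int) + 1) = some w := by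
          rw [show (((k + 1 : Nat) : Int) + 1) = (((k + 2 : Nat)) : Int) from by push_cast; ring,
              PySem.List.pyGet?_natCast]
          have h3 := hgw 1
          conv_lhs at h3 => rw [hr2]
          simpa using h3.symm
        conv_lhs => rw [hr2]
        rw [trD_one_mid words w _ (k + 1) acc hnext]
        rw [trD_append]
        simp only [List.length_replicate]
        rw [trD_replicate words w (a + 1) (k + 1 + 1) _ 2 le_rfl]
        have hdropa' : List.drop (a + 1 + 1) r = List.drop (k + 1 + 1 + (a + 1)) words := by
          rw [hdropa]; congr 1; omega
        rw [ih (List.drop (a + 1 + 1) r) (k + 1 + 1 + (a + 1)) (some w) (2 + ((a + 1 : Nat) : Int)) _ hlend hdropa' hprevd]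
        rw [if_neg (by omega : ¬ ((1 + (a + 1 + 1) : Nat) = 2))]
        rw [show k + (1 + (a + 1 + 1)) = k + 1 + 1 + (a + 1) from by omega]
        simp

-- ===== VERDICT (by name: the statement is the Claim_ definition above) =====
theorem rewrite_special_spec : Claim_equal_rewrite_special := by
  intro words _
  simp only [Spec_rewrite_special, rewrite_special, rewrite_special_alt]
  rw [show (0 : Int) = ((0 : Nat) : Int) from by simp]
  rw [bridgeT, bridgeD, foldBT, foldBD]
  rw [trD_main words words.length words 0 none 1 ((trT words words 0 ([], none, 1)).1) le_rfl (by simp) (by intro x r h; simp)]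
  rw [trT_main words words.length words 0 none 1 [] le_rfl (by simp) (by intro x r h; simp)]
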